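-- pv_equiv track=rewrite | github.com/Shirooo098/SmartByahe | byaheenv/backend/app/services/capture.py | _build_breakdown
-- ===== SOURCE A (Python) =====
-- def _normalize_label(label):
--     return str(label).strip().lower().replace("_", " ").replace("-", " ")
--
-- def _build_breakdown(class_counts):
--     breakdown = {
--         "childMale": 0,
--         "adultMale": 0,
--         "seniorMale": 0,
--         "childFemale": 0,
--         "adultFemale": 0,
--         "seniorFemale": 0,
--     }
--
--     for raw_name, count in class_counts.items():
--         normalized = _normalize_label(raw_name)
--         n = int(count) if isinstance(count, (int, float)) else 0
--
--         if "male" in normalized and "female" not in normalized: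
--             if "child" in normalized:
--                 breakdown["childMale"] += n
--             elif "senior" in normalized:
--                 breakdown["seniorMale"] += n
--             elif "adult" in normalized:
--                 breakdown["adultMale"] += n
--         elif "female" in normalized:
--             if "child" in normalized:
--                 breakdown["childFemale"] += n
--             elif "senior" in normalized:
--                 breakdown["seniorFemale"] += n
--             elif "adult" in normalized:
--                 breakdown["adultFemale"] += n
--
--     return breakdown
-- ===== SOURCE B (Python) =====
-- _ORDER = ["childMale", "adultMale", "seniorMale", "childFemale", "adultFemale", "seniorFemale"]
--
-- def _classify(raw_name):
--     s = str(raw_name).strip().lower().replace("_", " ").replace("-", " ")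
--     if "male" in s and "female" not in s:
--         sex = "Male"
--     elif "female" in s:
--         sex = "Female"
--     else:
--         return None
--     for age in ("child", "senior", "adult"):
--         if age in s:
--             return age + sex
--     return None
--
-- def _build_breakdown(class_counts):
--     return {
--         key: sum((int(c) if isinstance(c, (int, float)) else 0)
--                  for name, c in class_counts.items()
--                  if _classify(name) == key)
--         for key in _ORDER
--     }
-- ===== Notes on version B (the rewrite author's own statement) =====
-- stated objective: simpler
-- what changed: Replaces A's six-way nested branch updating a mutable dict in one pass by a classify helper (sex and age computed independently, key = age+sex) and a per-bucket dict comprehension that sums the counts classified to each key.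
import Mathlib
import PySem

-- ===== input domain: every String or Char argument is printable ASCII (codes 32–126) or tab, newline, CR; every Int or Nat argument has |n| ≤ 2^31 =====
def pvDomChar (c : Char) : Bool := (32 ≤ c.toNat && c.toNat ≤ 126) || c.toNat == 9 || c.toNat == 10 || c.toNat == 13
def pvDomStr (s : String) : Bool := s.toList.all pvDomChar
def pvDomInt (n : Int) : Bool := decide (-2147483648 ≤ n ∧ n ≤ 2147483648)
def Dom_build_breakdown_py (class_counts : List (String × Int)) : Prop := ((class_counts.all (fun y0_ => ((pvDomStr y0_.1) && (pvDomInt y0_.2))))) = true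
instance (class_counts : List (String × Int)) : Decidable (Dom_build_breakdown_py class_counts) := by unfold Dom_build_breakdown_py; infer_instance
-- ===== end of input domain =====

-- B changes the decomposition only (classify helper + per-bucket comprehension); same values, no speed claim.

-- ===== PORT A =====
def normalize_label (label : String) : String :=
  PySem.Str.replace (PySem.Str.replace (PySem.Str.lower (PySem.Str.strip label)) "_" " ") "-" " "

def bdStep (bd : PySem.Dict String Int) (p : String × Int) : PySem.Dict String Int :=
  let normalized := normalize_label p.1
  let n := p.2  -- count is always an int here
  if PySem.Str.isIn "male" normalized && !(PySem.Str.isIn "female" normalized) then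
    if PySem.Str.isIn "child" normalized then bd.insert "childMale" (bd.getD "childMale" 0 + n)
    else if PySem.Str.isIn "senior" normalized then bd.insert "seniorMale" (bd.getD "seniorMale" 0 + n)
    else if PySem.Str.isIn "adult" normalized then bd.insert "adultMale" (bd.getD "adultMale" 0 + n)
    else bd
  else if PySem.Str.isIn "female" normalized then
    if PySem.Str.isIn "child" normalized then bd.insert "childFemale" (bd.getD "childFemale" 0 + n)
    else if PySem.Str.isIn "senior" normalized then bd.insert "seniorFemale" (bd.getD "seniorFemale" 0 + n)
    else if PySem.Str.isIn "adult" normalized then bd.insert "adultFemale" (bd.getD "adultFemale" 0 + n)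
    else bd
  else bd

def build_breakdown_py (class_counts : List (String × Int)) : List (String × Int) :=
  let breakdown : PySem.Dict String Int := PySem.Dict.ofList
    [("childMale", 0), ("adultMale", 0), ("seniorMale", 0),
     ("childFemale", 0), ("adultFemale", 0), ("seniorFemale", 0)]
  (class_counts.foldl bdStep breakdown).items

-- ===== PORT B =====
def classify_alt (raw_name : String) : Option String :=
  let s := PySem.Str.replace (PySem.Str.replace (PySem.Str.lower (PySem.Str.strip raw_name)) "_" " ") "-" " "
  let sex? : Option String :=
    if PySem.Str.isIn "male" s && !(PySem.Str.isIn "female" s) then some "Male"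
    else if PySem.Str.isIn "female" s then some "Female"
    else none
  match sex? with
  | none => none
  | some sex =>
    if PySem.Str.isIn "child" s then some ("child" ++ sex)
    else if PySem.Str.isIn "senior" s then some ("senior" ++ sex)
    else if PySem.Str.isIn "adult" s then some ("adult" ++ sex)
    else none

def build_breakdown_py_alt (class_counts : List (String × Int)) : List (String × Int) :=
  ["childMale", "adultMale", "seniorMale", "childFemale", "adultFemale", "seniorFemale"].map
    (fun key => (key, class_counts.foldl
      (fun acc p => if classify_alt p.1 == some key then acc + p.2 else acc) 0))

-- ===== PRECONDITION & SPEC =====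
def Spec_build_breakdown_py (class_counts : List (String × Int)) (out : List (String × Int)) : Prop := out = build_breakdown_py_alt class_counts
instance (class_counts : List (String × Int)) (out : List (String × Int)) : Decidable (Spec_build_breakdown_py class_counts out) := by unfold Spec_build_breakdown_py; infer_instance

-- ===== CLAIM (what is proved, stated in full; the proofs are below) =====
def Claim_equal_build_breakdown_py : Prop := ∀ (class_counts : List (String × Int)), Dom_build_breakdown_py class_counts → Spec_build_breakdown_py class_counts (build_breakdown_py class_counts)

-- ===== LEMMAS AND PROOFS =====

-- The canonical six-key dict A's loop maintains.
def D6 (v1 v2 v3 v4 v5 v6 : Int) : PySem.Dict String Int :=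
  PySem.Dict.mk
    [("childMale", v1), ("adultMale", v2), ("seniorMale", v3),
     ("childFemale", v4), ("adultFemale", v5), ("seniorFemale", v6)]

def delta (key : String) (p : String × Int) : Int :=
  if classify_alt p.1 == some key then p.2 else 0

set_option maxHeartbeats 2000000 in
lemma bdStep_D6 (v1 v2 v3 v4 v5 v6 : Int) (p : String × Int) :
    bdStep (D6 v1 v2 v3 v4 v5 v6) p =
      D6 (v1 + delta "childMale" p) (v2 + delta "adultMale" p) (v3 + delta "seniorMale" p)
         (v4 + delta "childFemale" p) (v5 + delta "adultFemale" p) (v6 + delta "seniorFemale" p) := by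
  obtain ⟨name, n⟩ := p
  unfold bdStep delta classify_alt normalize_label
  generalize (PySem.Str.replace (PySem.Str.replace (PySem.Str.lower (PySem.Str.strip name)) "_" " ") "-" " ") = s
  by_cases hm : PySem.Str.isIn "male" s <;>
  by_cases hf : PySem.Str.isIn "female" s <;>
  by_cases hc : PySem.Str.isIn "child" s <;>
  by_cases hsn : PySem.Str.isIn "senior" s <;>
  by_cases ha : PySem.Str.isIn "adult" s <;>
    · simp only [hm, hf, hc, hsn, ha, Bool.not_true, Bool.not_false,
        Bool.and_true, Bool.and_false, if_true, Option.some.injEq, beq_iff_eq]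
      try (apply PySem.Dict.ext
           simp [D6, PySem.Dict.items_insert, PySem.Dict.getD_eq_get?_getD,
             PySem.Dict.contains_mk, PySem.Dict.get?])

lemma sum_shift (key : String) (l : List (String × Int)) (a : Int) :
    l.foldl (fun acc p => if classify_alt p.1 == some key then acc + p.2 else acc) a
      = a + l.foldl (fun acc p => if classify_alt p.1 == some key then acc + p.2 else acc) 0 := by
  induction l generalizing a with
  | nil => simp
  | cons p t ih =>
    simp only [List.foldl_cons]
    rw [ih, ih (if classify_alt p.1 == some key then 0 + p.2 else 0)]
    split <;> omega

def S (key : String) (l : List (String × Int)) : Int :=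
  l.foldl (fun acc p => if classify_alt p.1 == some key then acc + p.2 else acc) 0

lemma loop_D6 (l : List (String × Int)) (v1 v2 v3 v4 v5 v6 : Int) :
    l.foldl bdStep (D6 v1 v2 v3 v4 v5 v6) =
      D6 (v1 + S "childMale" l) (v2 + S "adultMale" l) (v3 + S "seniorMale" l)
         (v4 + S "childFemale" l) (v5 + S "adultFemale" l) (v6 + S "seniorFemale" l) := by
  induction l generalizing v1 v2 v3 v4 v5 v6 with
  | nil => simp [S]
  | cons p t ih =>
    simp only [List.foldl_cons, bdStep_D6, ih]
    have h : ∀ key, S key (p :: t) = delta key p + S key t := by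
      intro key
      simp only [S, List.foldl_cons, delta]
      rw [sum_shift]
      split <;> omega
    simp only [h]
    congr 1 <;> omega

-- ===== VERDICT (by name: the statement is the Claim_ definition above) =====
theorem build_breakdown_py_spec : Claim_equal_build_breakdown_py := by
  intro l _
  show build_breakdown_py l = build_breakdown_py_alt l
  unfold build_breakdown_py build_breakdown_py_alt
  have : PySem.Dict.ofList
      [("childMale", (0:Int)), ("adultMale", 0), ("seniorMale", 0),
       ("childFemale", 0), ("adultFemale", 0), ("seniorFemale", 0)] = D6 0 0 0 0 0 0 := by decide
  simp only [this]
  rw [loop_D6]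
  simp only [D6, S, List.map]
  norm_num
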